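-- pv_equiv track=rewrite | github.com/sfox2006/anureview-standalone | scripts/refresh_researchportal_academics.py | infer_school
-- ===== SOURCE A (Python) =====
-- def infer_school(affiliations: list[str]) -> str:
--     for affiliation in affiliations:
--         cleaned = affiliation.strip()
--         if cleaned and cleaned != "The Australian National University" and not cleaned.startswith("ANU College of"):
--             return cleaned
--     for affiliation in affiliations:
--         if affiliation.strip():
--             return affiliation.strip()
--     return "ANU Research Portal+"
-- ===== SOURCE B (Python) =====
-- def infer_school(affiliations: list[str]) -> str:
--     fallback = None
--     for affiliation in affiliations:
--         cleaned = affiliation.strip()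
--         if not cleaned:
--             continue
--         if fallback is None:
--             fallback = cleaned
--         if cleaned != "The Australian National University" and not cleaned.startswith("ANU College of"):
--             return cleaned
--     return fallback if fallback is not None else "ANU Research Portal+"
-- ===== Notes on version B (the rewrite author's own statement) =====
-- stated objective: simpler
-- what changed: Replaces A's two sequential passes (one for suitable values, one for the non-empty fallback) with a single pass that records the first non-empty stripped value as fallback and returns the first suitable value immediately.
import Mathlib
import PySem

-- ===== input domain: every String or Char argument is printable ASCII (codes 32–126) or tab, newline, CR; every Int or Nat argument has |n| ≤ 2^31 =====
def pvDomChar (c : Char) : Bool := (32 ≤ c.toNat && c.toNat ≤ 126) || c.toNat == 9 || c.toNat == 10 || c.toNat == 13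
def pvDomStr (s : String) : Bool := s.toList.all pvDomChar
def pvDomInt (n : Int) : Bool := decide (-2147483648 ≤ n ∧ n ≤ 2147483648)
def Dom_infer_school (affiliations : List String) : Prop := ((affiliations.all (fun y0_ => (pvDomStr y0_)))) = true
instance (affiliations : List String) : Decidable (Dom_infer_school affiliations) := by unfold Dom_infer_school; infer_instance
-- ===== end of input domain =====

-- B replaces A's two sequential passes with one pass that records the first non-empty
-- stripped value as a fallback and returns the first suitable value immediately (simpler).

-- ===== PORT A =====
-- first pass of A: first stripped value that is non-empty, ≠ ANU, and not 'ANU College of…'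
def inferSchoolPass1 (affiliations : List String) : Option String :=
  match affiliations with
  | [] => none
  | a :: rest =>
    let cleaned := PySem.Str.strip a
    if cleaned ≠ "" ∧ cleaned ≠ "The Australian National University" ∧
        ¬ (PySem.Str.startswith cleaned "ANU College of" = true) then
      some cleaned
    else inferSchoolPass1 rest

-- second pass of A: first non-empty stripped value
def inferSchoolPass2 (affiliations : List String) : Option String :=
  match affiliations with
  | [] => none
  | a :: rest =>
    if PySem.Str.strip a ≠ "" then some (PySem.Str.strip a)
    else inferSchoolPass2 rest

def infer_school (affiliations : List String) : String :=
  match inferSchoolPass1 affiliations with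
  | some s => s
  | none =>
    match inferSchoolPass2 affiliations with
    | some s => s
    | none => "ANU Research Portal+"

-- ===== PORT B =====
def inferSchoolGo (affiliations : List String) (fallback : Option String) : String :=
  match affiliations with
  | [] =>
    match fallback with
    | some f => f
    | none => "ANU Research Portal+"
  | a :: rest =>
    let cleaned := PySem.Str.strip a
    if cleaned = "" then inferSchoolGo rest fallback
    else
      let fallback' := match fallback with
        | none => some cleaned
        | some f => some f
      if cleaned ≠ "The Australian National University" ∧
          ¬ (PySem.Str.startswith cleaned "ANU College of" = true) then cleaned
      else inferSchoolGo rest fallback'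

def infer_school_alt (affiliations : List String) : String :=
  inferSchoolGo affiliations none

-- ===== PRECONDITION & SPEC =====
def Spec_infer_school (affiliations : List String) (out : String) : Prop := out = infer_school_alt affiliations
instance (affiliations : List String) (out : String) : Decidable (Spec_infer_school affiliations out) := by unfold Spec_infer_school; infer_instance

-- ===== CLAIM (what is proved, stated in full; the proofs are below) =====
def Claim_equal_infer_school : Prop := ∀ (affiliations : List String), Dom_infer_school affiliations → Spec_infer_school affiliations (infer_school affiliations)

-- ===== LEMMAS AND PROOFS =====
theorem inferSchoolGo_eq (affiliations : List String) (fallback : Option String) :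
    inferSchoolGo affiliations fallback =
      match inferSchoolPass1 affiliations with
      | some s => s
      | none =>
        match fallback with
        | some f => f
        | none =>
          match inferSchoolPass2 affiliations with
          | some s => s
          | none => "ANU Research Portal+" := by
  induction affiliations generalizing fallback with
  | nil => cases fallback <;> simp [inferSchoolGo, inferSchoolPass1, inferSchoolPass2]
  | cons a rest ih =>
    simp only [inferSchoolGo, inferSchoolPass1, inferSchoolPass2]
    by_cases h0 : PySem.Str.strip a = ""
    · rw [if_pos h0, if_neg (fun h => h.1 h0), if_neg (not_not_intro h0)]
      exact ih fallback
    · by_cases h1 : PySem.Str.strip a ≠ "The Australian National University" ∧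
          ¬ (PySem.Str.startswith (PySem.Str.strip a) "ANU College of" = true)
      · rw [if_neg h0, if_pos h1, if_pos ⟨h0, h1.1, h1.2⟩]
      · rw [if_neg h0, if_neg h1, if_neg (fun h => h1 ⟨h.2.1, h.2.2⟩), if_pos h0]
        rw [ih]; cases fallback <;> simp

-- ===== VERDICT (by name: the statement is the Claim_ definition above) =====
theorem infer_school_spec : Claim_equal_infer_school := by
  intro affiliations _
  unfold Spec_infer_school infer_school infer_school_alt
  rw [inferSchoolGo_eq]
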